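-- pv_equiv track=rewrite | github.com/hyeongrokheo/baekjoon | programmers/모의고사.py | solution
-- ===== SOURCE A (Python) =====
-- def solution(answers):
--     num = len(answers)
--
--     ans_1 = [1, 2, 3, 4, 5] * (num // 5 + 1)
--     ans_2 = [2, 1, 2, 3, 2, 4, 2, 5] * (num // 8 + 1)
--     ans_3 = [3, 3, 1, 1, 2, 2, 4, 4, 5, 5] * (num // 10 + 1)
--
--     scores = [[0, 0], [1, 0], [2, 0]]
--
--     for i in range(num):
--         answer = answers[i]
--         if answer == ans_1[i]:
--             scores[0][1] += 1
--         if answer == ans_2[i]: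
--             scores[1][1] += 1
--         if answer == ans_3[i]:
--             scores[2][1] += 1
--
--     top_score = max(scores, key = lambda x: x[1])[1]
--
--     result = list(map(lambda x: x[0]+1, filter(lambda x: x[1] == top_score, scores)))
--
--     return result
-- ===== SOURCE B (Python) =====
-- def solution(answers):
--     patterns = [[1, 2, 3, 4, 5], [2, 1, 2, 3, 2, 4, 2, 5], [3, 3, 1, 1, 2, 2, 4, 4, 5, 5]]
--     # All three patterns are periodic with period dividing 40 = lcm(5, 8, 10), so an
--     # answer's contribution depends only on (its position mod 40, its value).
--     # Bucket the answers by that pair once, then score each pattern by 40 dict lookups.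
--     cnt = {}
--     for i, a in enumerate(answers):
--         key = (i % 40, a)
--         cnt[key] = cnt.get(key, 0) + 1
--     scores = [sum(cnt.get((r, pat[r % len(pat)]), 0) for r in range(40)) for pat in patterns]
--     m = max(scores)
--     return [i + 1 for i, s in enumerate(scores) if s == m]
-- ===== Notes on version B (the rewrite author's own statement) =====
-- stated objective: alternative
-- what changed: Instead of comparing each answer against pre-built repeated pattern lists in one fused loop, B buckets the answers into a dictionary keyed by (position mod 40, value) -- 40 = lcm of the pattern periods -- and then scores each pattern by summing 40 dictionary lookups, never comparing individual answers to patterns.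
import Mathlib
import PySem

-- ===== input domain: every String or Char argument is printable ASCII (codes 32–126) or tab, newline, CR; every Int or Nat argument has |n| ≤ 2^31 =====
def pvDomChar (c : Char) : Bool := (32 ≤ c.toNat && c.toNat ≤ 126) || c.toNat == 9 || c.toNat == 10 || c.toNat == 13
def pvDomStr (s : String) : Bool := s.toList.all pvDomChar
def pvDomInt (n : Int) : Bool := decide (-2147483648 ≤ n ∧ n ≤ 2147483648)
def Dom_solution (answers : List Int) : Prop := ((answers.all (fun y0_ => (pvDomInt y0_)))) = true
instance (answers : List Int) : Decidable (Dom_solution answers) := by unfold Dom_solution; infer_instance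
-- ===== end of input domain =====

-- B buckets answers into a dict keyed by (index mod 40, value) — 40 = lcm of the pattern
-- periods — and scores each pattern by 40 dictionary lookups instead of A's fused
-- compare-against-repeated-lists loop (alternative algorithm, same asymptotic cost).


-- ===== PORT A =====
def solution (answers : List Int) : List Int :=
  let num : Int := answers.length
  let ans1 := PySem.List.pyRepeat [1, 2, 3, 4, 5] (PySem.Int.floordiv num 5 + 1)
  let ans2 := PySem.List.pyRepeat [2, 1, 2, 3, 2, 4, 2, 5] (PySem.Int.floordiv num 8 + 1)
  let ans3 := PySem.List.pyRepeat [3, 3, 1, 1, 2, 2, 4, 4, 5, 5] (PySem.Int.floordiv num 10 + 1)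
  let scores := (PySem.List.pyRange 0 num 1).foldl
    (fun (sc : List (Int × Int)) i =>
      let answer := PySem.List.pyGetD answers i 0
      let sc := if answer = PySem.List.pyGetD ans1 i 0 then sc.modify 0 (fun p => (p.1, p.2 + 1)) else sc
      let sc := if answer = PySem.List.pyGetD ans2 i 0 then sc.modify 1 (fun p => (p.1, p.2 + 1)) else sc
      if answer = PySem.List.pyGetD ans3 i 0 then sc.modify 2 (fun p => (p.1, p.2 + 1)) else sc)
    [(0, 0), (1, 0), (2, 0)]
  let top := ((PySem.List.max? scores (fun x => x.2)).getD (0, 0)).2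
  (scores.filter (fun x => x.2 = top)).map (fun x => x.1 + 1)

-- ===== PORT B =====
-- cnt.get((r, pat[r % len(pat)]), 0) summed over r in range(40)
def scoreB (cnt : PySem.Dict (Int × Int) Int) (pat : List Int) : Int :=
  ((PySem.List.pyRange 0 40 1).map
    (fun r => cnt.getD (r, PySem.List.pyGetD pat (PySem.Int.mod r (pat.length : Int)) 0) 0)).sum

def solution_alt (answers : List Int) : List Int :=
  let patterns : List (List Int) := [[1, 2, 3, 4, 5], [2, 1, 2, 3, 2, 4, 2, 5], [3, 3, 1, 1, 2, 2, 4, 4, 5, 5]]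
  let cnt := (PySem.List.enumerate answers 0).foldl
    (fun (d : PySem.Dict (Int × Int) Int) p =>
      let key := (PySem.Int.mod p.1 40, p.2)
      d.insert key (d.getD key 0 + 1)) PySem.Dict.empty
  let scores := patterns.map (fun pat => scoreB cnt pat)
  let m := (PySem.List.max? scores (fun x => x)).getD 0
  (PySem.List.enumerate scores 0).filterMap (fun p => if p.2 = m then some (p.1 + 1) else none)

-- ===== PRECONDITION & SPEC =====
def Spec_solution (answers : List Int) (out : List Int) : Prop := out = solution_alt answers
instance (answers : List Int) (out : List Int) : Decidable (Spec_solution answers out) := by unfold Spec_solution; infer_instance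

-- ===== CLAIM (what is proved, stated in full; the proofs are below) =====
def Claim_equal_solution : Prop := ∀ (answers : List Int), Dom_solution answers → Spec_solution answers (solution answers)

-- ===== LEMMAS AND PROOFS =====

-- the common yardstick: how many enumerated answers match pattern `pat` cyclically
def refScore (pat : List Int) (answers : List Int) : Int :=
  ((PySem.List.enumerate answers 0).countP
    (fun p => PySem.List.pyGetD pat (PySem.Int.mod p.1 (pat.length : Int)) 0 == p.2) : Int)

-- A's tail (max over the [label, count] table, then filter+map), as a function of the table
def tailA (scores : List (Int × Int)) : List Int :=
  (scores.filter (fun x => x.2 = ((PySem.List.max? scores (fun x => x.2)).getD (0, 0)).2)).map (fun x => x.1 + 1)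

-- B's tail (max over the plain score list, then enumerate+filter), as a function of the scores
def tailB (scores : List Int) : List Int :=
  (PySem.List.enumerate scores 0).filterMap
    (fun p => if p.2 = (PySem.List.max? scores (fun x => x)).getD 0 then some (p.1 + 1) else none)

-- indexing a k-fold repetition is modulo indexing
lemma flatten_replicate_get (pat : List Int) (k j : Nat) (hj : j < k * pat.length) :
    (List.replicate k pat).flatten[j]? = pat[j % pat.length]? := by
  induction k generalizing j with
  | zero => omega
  | succ k ih =>
    have hlen : 0 < pat.length := by by_contra h; simp at h; simp [h] at hj
    rw [List.replicate_succ, List.flatten_cons]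
    by_cases h : j < pat.length
    · rw [List.getElem?_append_left h, Nat.mod_eq_of_lt h]
    · rw [List.getElem?_append_right (by omega)]
      rw [Nat.mod_eq_sub_mod (by omega)]
      exact ih (j - pat.length) (by rw [Nat.succ_mul] at hj; omega)

lemma pyGetD_pyRepeat (pat : List Int) (num i : Int) (h0 : 0 ≤ i) (hi : i < num)
    (hlen : 0 < pat.length) :
    PySem.List.pyGetD (PySem.List.pyRepeat pat (PySem.Int.floordiv num (pat.length : Int) + 1)) i 0
      = PySem.List.pyGetD pat (PySem.Int.mod i (pat.length : Int)) 0 := by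
  have hL : (0 : Int) < (pat.length : Int) := by exact_mod_cast hlen
  set k : Int := PySem.Int.floordiv num (pat.length : Int) + 1 with hk
  have hsplit := PySem.Int.floordiv_mul_add_mod num (pat.length : Int)
  have hmlt := PySem.Int.mod_lt num hL
  have hmge := PySem.Int.mod_nonneg num hL
  have hprod : k * (pat.length : Int)
      = PySem.Int.floordiv num (pat.length : Int) * (pat.length : Int) + (pat.length : Int) := by
    rw [hk]; ring
  have hik : i < k * (pat.length : Int) := by omega
  have hkpos : 0 < k := by
    rcases le_or_gt k 0 with h | h
    · have := mul_nonpos_of_nonpos_of_nonneg h hL.le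
      omega
    · exact h
  have hkn : ((k.toNat : Int)) = k := Int.toNat_of_nonneg hkpos.le
  have hik' : i.toNat < k.toNat * pat.length := by
    have h2 : i < ((k.toNat * pat.length : Nat) : Int) := by push_cast [hkn]; exact hik
    omega
  have hmod : PySem.Int.mod i (pat.length : Int) = ((i.toNat % pat.length : Nat) : Int) := by
    conv_lhs => rw [← Int.toNat_of_nonneg h0]
    exact PySem.Int.mod_natCast i.toNat pat.length
  rw [PySem.List.pyGetD_of_nonneg _ _ h0, hmod,
      PySem.List.pyGetD_of_nonneg _ _ (Int.natCast_nonneg _)]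
  simp only [PySem.List.pyRepeat, Int.toNat_natCast]
  rw [List.getD_eq_getElem?_getD, List.getD_eq_getElem?_getD,
      flatten_replicate_get pat k.toNat i.toNat hik']

-- the fused loop over the 3-entry score table splits into three independent count folds
lemma foldl_triple (f g1 g2 g3 : Int → Int) (L : List Int) (a b c : Int) :
    L.foldl (fun (sc : List (Int × Int)) i =>
        let answer := f i
        let sc := if answer = g1 i then sc.modify 0 (fun p => (p.1, p.2 + 1)) else sc
        let sc := if answer = g2 i then sc.modify 1 (fun p => (p.1, p.2 + 1)) else sc
        if answer = g3 i then sc.modify 2 (fun p => (p.1, p.2 + 1)) else sc) [(0, a), (1, b), (2, c)]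
      = [(0, L.foldl (fun acc i => if f i = g1 i then acc + 1 else acc) a),
         (1, L.foldl (fun acc i => if f i = g2 i then acc + 1 else acc) b),
         (2, L.foldl (fun acc i => if f i = g3 i then acc + 1 else acc) c)] := by
  induction L generalizing a b c with
  | nil => simp
  | cons x t ih =>
    have hstep : ∀ a b c : Int,
        (fun (sc : List (Int × Int)) i =>
            let answer := f i
            let sc := if answer = g1 i then sc.modify 0 (fun p => (p.1, p.2 + 1)) else sc
            let sc := if answer = g2 i then sc.modify 1 (fun p => (p.1, p.2 + 1)) else sc
            if answer = g3 i then sc.modify 2 (fun p => (p.1, p.2 + 1)) else sc) [(0, a), (1, b), (2, c)] x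
          = [(0, if f x = g1 x then a + 1 else a), (1, if f x = g2 x then b + 1 else b),
             (2, if f x = g3 x then c + 1 else c)] := by
      intro a b c
      simp only []
      split_ifs <;> rfl
    simp only [List.foldl_cons, hstep, ih]

-- A's per-pattern count over the repeated list is the reference cyclic-match count
lemma scoreA_eq (pat answers : List Int) (hlen : 0 < pat.length) (d : Int)
    (hd : d = (pat.length : Int)) :
    (PySem.List.pyRange 0 ((answers.length : Int)) 1).foldl
      (fun acc i => if PySem.List.pyGetD answers i 0
            = PySem.List.pyGetD (PySem.List.pyRepeat pat (PySem.Int.floordiv ((answers.length : Int)) d + 1)) i 0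
          then acc + 1 else acc) 0
      = refScore pat answers := by
  subst hd
  unfold refScore
  rw [PySem.List.enumerate_eq_map_pyRange answers 0, List.countP_map]
  simp only [PySem.List.len_eq]
  rw [PySem.List.foldl_ite_add_one
        (p := fun i => PySem.List.pyGetD answers i 0
          = PySem.List.pyGetD (PySem.List.pyRepeat pat
              (PySem.Int.floordiv ((answers.length : Int)) ((pat.length : Int)) + 1)) i 0) _ 0,
      zero_add]
  congr 1
  apply List.countP_congr
  intro i hi
  rw [PySem.List.mem_pyRange_one] at hi
  simp only [Function.comp, decide_eq_true_eq, beq_iff_eq]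
  rw [pyGetD_pyRepeat pat (answers.length : Int) i hi.1 hi.2 hlen]
  exact eq_comm

-- summing an "exactly one index matches" indicator over a duplicate-free list
lemma sum_single_hit (R : List Int) (hnd : R.Nodup) (m : Int) (hm : m ∈ R) (f : Int → Int) :
    (R.map (fun r => if m = r then f r else 0)).sum = f m := by
  induction R with
  | nil => cases hm
  | cons x t ih =>
    rw [List.map_cons, List.sum_cons]
    rcases List.mem_cons.mp hm with h | h
    · subst h
      have hz : (t.map (fun r => if m = r then f r else 0)).sum = 0 := by
        apply List.sum_eq_zero
        intro y hy
        rcases List.mem_map.mp hy with ⟨r, hr, rfl⟩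
        have : m ≠ r := fun e => (List.nodup_cons.mp hnd).1 (e ▸ hr)
        simp [this]
      simp [hz]
    · have hx : m ≠ x := fun e => (List.nodup_cons.mp hnd).1 (e ▸ h)
      simp [hx, ih (List.nodup_cons.mp hnd).2 h]

-- B's 40 dictionary lookups for a pattern add up to the reference cyclic-match count,
-- because each enumerated answer lands in exactly one residue bucket
lemma scoreB_eq (pat answers : List Int) (hdvd : pat.length ∣ 40) :
    scoreB ((PySem.List.enumerate answers 0).foldl
        (fun (d : PySem.Dict (Int × Int) Int) p =>
          let key := (PySem.Int.mod p.1 40, p.2)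
          d.insert key (d.getD key 0 + 1)) PySem.Dict.empty) pat
      = refScore pat answers := by
  unfold scoreB refScore
  rw [show ((PySem.List.enumerate answers 0).foldl
        (fun (d : PySem.Dict (Int × Int) Int) p =>
          let key := (PySem.Int.mod p.1 40, p.2)
          d.insert key (d.getD key 0 + 1)) PySem.Dict.empty)
      = PySem.Dict.counter ((PySem.List.enumerate answers 0).map (fun p => (PySem.Int.mod p.1 40, p.2)))
    from by rw [← PySem.Dict.foldl_insert_getD_add_one_eq_counter, List.foldl_map]]
  have hnn : ∀ p ∈ PySem.List.enumerate answers 0, (0 : Int) ≤ p.1 := by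
    intro p hp
    rcases (PySem.List.mem_enumerate_iff _ _ _).mp hp with ⟨k, hk, rfl⟩
    simp
  -- fold the sum of counts into a countP by induction on the enumerated list
  generalize hL : PySem.List.enumerate answers 0 = L at hnn ⊢
  clear hL
  induction L with
  | nil =>
    simp [PySem.Dict.getD_counter, List.sum_eq_zero]
  | cons x t ih =>
    have hx0 : (0 : Int) ≤ x.1 := hnn x (by simp)
    have hmem : PySem.Int.mod x.1 40 ∈ PySem.List.pyRange 0 40 1 := by
      rw [PySem.List.mem_pyRange_one]
      exact ⟨PySem.Int.mod_nonneg _ (by norm_num), PySem.Int.mod_lt _ (by norm_num)⟩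
    have hsplit : ∀ r : Int,
        ((((x :: t).map (fun p => (PySem.Int.mod p.1 40, p.2))).count
            (r, PySem.List.pyGetD pat (PySem.Int.mod r (pat.length : Int)) 0) : Nat) : Int)
        = (((t.map (fun p => (PySem.Int.mod p.1 40, p.2))).count
            (r, PySem.List.pyGetD pat (PySem.Int.mod r (pat.length : Int)) 0) : Nat) : Int)
          + (if PySem.Int.mod x.1 40 = r ∧
                x.2 = PySem.List.pyGetD pat (PySem.Int.mod r (pat.length : Int)) 0 then (1:Int) else 0) := by
      intro r
      simp only [List.map_cons, List.count_cons, beq_iff_eq, Prod.mk.injEq]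
      by_cases h1 : PySem.Int.mod x.1 40 = r <;>
        by_cases h2 : x.2 = PySem.List.pyGetD pat (PySem.Int.mod r (pat.length : Int)) 0 <;>
        simp [h2]
    simp only [PySem.Dict.getD_counter] at ih ⊢
    rw [List.map_congr_left (fun r _ => hsplit r), PySem.List.sum_map_add_int,
        ih (fun p hp => hnn p (by simp [hp]))]
    -- the indicator sum picks out exactly the residue of x
    have hind : ((PySem.List.pyRange 0 40 1).map
        (fun r => if PySem.Int.mod x.1 40 = r ∧
            x.2 = PySem.List.pyGetD pat (PySem.Int.mod r (pat.length : Int)) 0 then (1:Int) else 0)).sum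
        = if x.2 = PySem.List.pyGetD pat (PySem.Int.mod (PySem.Int.mod x.1 40) (pat.length : Int)) 0
          then 1 else 0 := by
      have hf : (fun r => if PySem.Int.mod x.1 40 = r ∧
            x.2 = PySem.List.pyGetD pat (PySem.Int.mod r (pat.length : Int)) 0 then (1:Int) else 0)
          = (fun r => if PySem.Int.mod x.1 40 = r then
              (if x.2 = PySem.List.pyGetD pat (PySem.Int.mod r (pat.length : Int)) 0 then (1:Int) else 0)
              else 0) := by
        funext r
        by_cases h1 : PySem.Int.mod x.1 40 = r <;>
          by_cases h2 : x.2 = PySem.List.pyGetD pat (PySem.Int.mod r (pat.length : Int)) 0 <;>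
          simp [h2]
      rw [hf]
      exact sum_single_hit (PySem.List.pyRange 0 40 1) (by decide) (PySem.Int.mod x.1 40) hmem
        (fun r => if x.2 = PySem.List.pyGetD pat (PySem.Int.mod r (pat.length : Int)) 0 then (1:Int) else 0)
    rw [hind]
    -- residues: (x.1 mod 40) mod len = x.1 mod len since len divides 40 and x.1 is nonnegative
    have hres : PySem.Int.mod (PySem.Int.mod x.1 40) (pat.length : Int)
        = PySem.Int.mod x.1 (pat.length : Int) := by
      conv_lhs => rw [show x.1 = ((x.1.toNat : Nat) : Int) from (Int.toNat_of_nonneg hx0).symm]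
      conv_rhs => rw [show x.1 = ((x.1.toNat : Nat) : Int) from (Int.toNat_of_nonneg hx0).symm]
      rw [show ((40 : Int)) = ((40 : Nat) : Int) from rfl, PySem.Int.mod_natCast,
          PySem.Int.mod_natCast, PySem.Int.mod_natCast, Nat.mod_mod_of_dvd _ hdvd]
    rw [hres]
    simp only [List.countP_cons, beq_iff_eq]
    rcases eq_or_ne x.2 (PySem.List.pyGetD pat (PySem.Int.mod x.1 (pat.length : Int)) 0) with h | h
    · rw [if_pos h, if_pos h.symm]; push_cast; ring
    · rw [if_neg h, if_neg (fun e => h e.symm)]; push_cast; ring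

lemma filter_map_eq (l : List (Int × Int)) (v : Int) :
    (l.filter (fun x => x.2 = v)).map (fun x => x.1 + 1)
      = l.filterMap (fun p => if p.2 = v then some (p.1 + 1) else none) := by
  induction l with
  | nil => rfl
  | cons x t ih => by_cases h : x.2 = v <;> simp [h, ih]

-- A's tail on the table [(0,s1),(1,s2),(2,s3)] agrees with B's tail on [s1,s2,s3]
lemma tail_eq (s1 s2 s3 : Int) : tailA [(0, s1), (1, s2), (2, s3)] = tailB [s1, s2, s3] := by
  unfold tailA tailB
  simp only [PySem.List.max?, PySem.List.enumerate, List.foldl]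
  split_ifs <;> simp only [] <;> split_ifs
    <;> simp only [Option.getD_some, zero_add, one_add_one_eq_two]
    <;> exact filter_map_eq _ _

-- ===== VERDICT (by name: the statement is the Claim_ definition above) =====
theorem solution_spec : Claim_equal_solution := by
  intro answers _
  show solution answers = solution_alt answers
  have h1 : solution answers = tailA
      ((PySem.List.pyRange 0 ((answers.length : Int)) 1).foldl
        (fun (sc : List (Int × Int)) i =>
          let answer := PySem.List.pyGetD answers i 0
          let sc := if answer = PySem.List.pyGetD (PySem.List.pyRepeat [1, 2, 3, 4, 5]
              (PySem.Int.floordiv ((answers.length : Int)) 5 + 1)) i 0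
            then sc.modify 0 (fun p => (p.1, p.2 + 1)) else sc
          let sc := if answer = PySem.List.pyGetD (PySem.List.pyRepeat [2, 1, 2, 3, 2, 4, 2, 5]
              (PySem.Int.floordiv ((answers.length : Int)) 8 + 1)) i 0
            then sc.modify 1 (fun p => (p.1, p.2 + 1)) else sc
          if answer = PySem.List.pyGetD (PySem.List.pyRepeat [3, 3, 1, 1, 2, 2, 4, 4, 5, 5]
              (PySem.Int.floordiv ((answers.length : Int)) 10 + 1)) i 0
            then sc.modify 2 (fun p => (p.1, p.2 + 1)) else sc)
        [(0, 0), (1, 0), (2, 0)]) := rfl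
  have h2 : solution_alt answers = tailB
      [refScore [1, 2, 3, 4, 5] answers, refScore [2, 1, 2, 3, 2, 4, 2, 5] answers,
       refScore [3, 3, 1, 1, 2, 2, 4, 4, 5, 5] answers] := by
    show tailB _ = _
    rw [show ([[1, 2, 3, 4, 5], [2, 1, 2, 3, 2, 4, 2, 5], [3, 3, 1, 1, 2, 2, 4, 4, 5, 5]] : List (List Int)).map
          (fun pat => scoreB _ pat)
        = [refScore [1, 2, 3, 4, 5] answers, refScore [2, 1, 2, 3, 2, 4, 2, 5] answers,
           refScore [3, 3, 1, 1, 2, 2, 4, 4, 5, 5] answers] from by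
      simp only [List.map_cons, List.map_nil]
      rw [scoreB_eq _ _ (by norm_num), scoreB_eq _ _ (by norm_num), scoreB_eq _ _ (by norm_num)]]
  simp only [foldl_triple] at h1
  rw [scoreA_eq [1, 2, 3, 4, 5] answers (by norm_num) 5 (by norm_num),
      scoreA_eq [2, 1, 2, 3, 2, 4, 2, 5] answers (by norm_num) 8 (by norm_num),
      scoreA_eq [3, 3, 1, 1, 2, 2, 4, 4, 5, 5] answers (by norm_num) 10 (by norm_num)] at h1
  rw [h1, h2]
  exact tail_eq _ _ _
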